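-- pv_equiv track=rewrite | github.com/shyblue/CustomNetwkrLib | packet_generator/packet_generator.py | make_cpp_unserialize
-- ===== SOURCE A (Python) =====
-- print_dictionary ={
-- 'char' : '%c'
-- ,'uchar' : '%c'
-- ,'int8_t' : '%c'
-- ,'uint8_t' : '%c'
-- ,'int16_t' : '%d'
-- ,'uint16_t' : '%d'
-- ,'int32_t' : '%d'
-- ,'uint32_t' : '%d'
-- ,'int64_t' : '%lld'
-- ,'uint64_t' : '%lld'
-- ,'std::string' : '%s'
-- ,'char*' : '%s'
-- }
--
-- def print_replacement(def_type) :
--     return print_dictionary[def_type]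
--
-- def get_index_list(arg, index, identify) :
--     arg_list=arg.split(identify)
--     return arg_list[index]
--
-- def make_print_string(args) :
--     result = ""
--     for arg in args :
--         arg_list = arg.split(' ')
--         result = result + arg_list[1] + '[' +print_replacement(arg_list[0]) + '], '
--
--
--     return result[:-2]
--
-- def make_arg_ref_string(args) :
--     result = ''
--     for arg in args :
--         arg = arg.replace(' ', '& ')
--         result += arg
--         result += ', '
--
--     return result[:-2]
--
-- def make_arg_2nd_val_enum(args, front) :
--     result = ''
--     for arg in args :
--         arg_list = arg.split(' ')
--         if arg_list[0] == 'std::string' :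
--             arg = front + arg_list[1] + '.c_str()'
--         else :
--             arg = front + arg_list[1]
--         result += arg
--         result += ', '
--
--     return result[:-2]
--
-- def make_cpp_unserialize(class_name, send_args) :
--
--     make_print_string(send_args)
--     read_str = ''
--     for arg in send_args :
--         _type = get_index_list(arg, 0, ' ')
--         name = get_index_list(arg, 1, ' ')
--         if _type == 'std::string' or _type == 'char*':
--             name_len = name +'_length'
--             if _type == 'std::string':
--                 read_str += name + '.resize('+name_len+');\n\t'
--                 read_str += "MEMORY_MANAGER::ReadFromBuffer(buffer, buffer_size, buffer_idx, &" + name + '[0], ' + name_len + ');\n\t'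
--             elif _type == 'char*':
--                 read_str += "MEMORY_MANAGER::ReadFromBuffer(buffer, buffer_size, buffer_idx, " + name + ', ' + name_len + ');\n\t'
--         else :
--             if _type == 'uint8_t' or _type == 'int8_t':
--                 read_str += 'MEMORY_MANAGER::ReadFromBuffer(buffer, buffer_size, buffer_idx, &' + name + ');\n\t'
--             else :
--                 read_str += 'MEMORY_MANAGER::ReadFromBuffer(buffer, buffer_size, buffer_idx, &' + name + ');\n\t'
--                 read_str += name + ' = BYTE_ORDER::network_to_host(' + name + ');\n\t'
--
--     result = '''
-- size_t {0:s}::Deserialize(char* buffer, size_t buffer_size, {1:s})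
-- {{
--     size_t buffer_idx = 0;
--
--     {2:s}
--
--     ST_LOGGER.Info("[{0:s}][InputData] {3:s}", {4:s});
--     return buffer_idx;
-- }}
--     '''.format(class_name,make_arg_ref_string(send_args),
--                read_str,make_print_string(send_args),make_arg_2nd_val_enum(send_args, ''))
--
--     return result
-- ===== SOURCE B (Python) =====
-- print_dictionary = {
--     'char': '%c', 'uchar': '%c', 'int8_t': '%c', 'uint8_t': '%c',
--     'int16_t': '%d', 'uint16_t': '%d', 'int32_t': '%d', 'uint32_t': '%d',
--     'int64_t': '%lld', 'uint64_t': '%lld', 'std::string': '%s', 'char*': '%s',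
-- }
--
-- def make_cpp_unserialize(class_name, send_args):
--     # One pass over send_args, collecting the four pieces at once.
--     refs, fmts, vals, body = [], [], [], []
--     for arg in send_args:
--         parts = arg.split(' ')
--         t, name = parts[0], parts[1]
--         refs.append(arg.replace(' ', '& '))
--         fmts.append(name + '[' + print_dictionary[t] + ']')
--         vals.append(name + '.c_str()' if t == 'std::string' else name)
--         if t == 'std::string':
--             body.append(name + '.resize(' + name + '_length);\n\t')
--             body.append('MEMORY_MANAGER::ReadFromBuffer(buffer, buffer_size, buffer_idx, &'
--                         + name + '[0], ' + name + '_length);\n\t')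
--         elif t == 'char*':
--             body.append('MEMORY_MANAGER::ReadFromBuffer(buffer, buffer_size, buffer_idx, '
--                         + name + ', ' + name + '_length);\n\t')
--         else:
--             body.append('MEMORY_MANAGER::ReadFromBuffer(buffer, buffer_size, buffer_idx, &'
--                         + name + ');\n\t')
--             if t not in ('uint8_t', 'int8_t'):
--                 body.append(name + ' = BYTE_ORDER::network_to_host(' + name + ');\n\t')
--     return ('\nsize_t ' + class_name + '::Deserialize(char* buffer, size_t buffer_size, '
--             + ', '.join(refs) + ')\n{\n    size_t buffer_idx = 0;\n\n    '
--             + ''.join(body) + '\n\n    ST_LOGGER.Info("[' + class_name + '][InputData] '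
--             + ', '.join(fmts) + '", ' + ', '.join(vals) + ');\n    return buffer_idx;\n}\n    ')
-- ===== Notes on version B (the rewrite author's own statement) =====
-- stated objective: simpler
-- what changed: Replaces A's four separate scans over send_args (three trailing-', '-trim helpers plus a discarded make_print_string call and the read-body loop) with one pass that splits each arg once and appends to four accumulator lists, joined afterwards with ', '.join / ''.join.
import Mathlib
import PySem

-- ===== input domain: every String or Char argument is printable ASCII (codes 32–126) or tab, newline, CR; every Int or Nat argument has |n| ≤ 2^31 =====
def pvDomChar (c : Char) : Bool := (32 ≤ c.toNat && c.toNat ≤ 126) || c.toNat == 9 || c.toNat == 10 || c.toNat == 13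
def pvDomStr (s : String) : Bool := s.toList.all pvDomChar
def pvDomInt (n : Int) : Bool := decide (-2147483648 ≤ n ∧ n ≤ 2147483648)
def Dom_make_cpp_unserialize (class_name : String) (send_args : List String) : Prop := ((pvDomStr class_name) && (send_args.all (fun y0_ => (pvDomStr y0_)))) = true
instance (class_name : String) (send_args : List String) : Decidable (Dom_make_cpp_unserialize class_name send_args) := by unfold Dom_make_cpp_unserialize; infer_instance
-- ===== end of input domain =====

-- B replaces A's four separate scans (plus a discarded fifth) by one pass collecting four
-- accumulator lists joined afterwards; same output (proved equal on Pre_).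

-- ===== PORT A =====
def print_dictionary : PySem.Dict String String := PySem.Dict.ofList
  [("char", "%c"), ("uchar", "%c"), ("int8_t", "%c"), ("uint8_t", "%c"),
   ("int16_t", "%d"), ("uint16_t", "%d"), ("int32_t", "%d"), ("uint32_t", "%d"),
   ("int64_t", "%lld"), ("uint64_t", "%lld"), ("std::string", "%s"), ("char*", "%s")]

-- KeyError (type not in print_dictionary) is excluded by Pre_; `.getD ""` marks that hole.
def print_replacement (def_type : String) : String := (print_dictionary.get? def_type).getD ""

-- IndexError (index out of range after split) is excluded by Pre_; `.getD ""` marks that hole.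
def get_index_list (arg : String) (index : Int) (identify : String) : String :=
  (PySem.List.pyGet? ((PySem.Str.split? arg identify).getD []) index).getD ""

def make_print_string (args : List String) : String :=
  let result := args.foldl (fun result arg =>
    let arg_list := (PySem.Str.split? arg " ").getD []
    result ++ ((PySem.List.pyGet? arg_list 1).getD "") ++ "[" ++
      print_replacement ((PySem.List.pyGet? arg_list 0).getD "") ++ "], ") ""
  PySem.Str.slice result none (some (-2))

def make_arg_ref_string (args : List String) : String :=
  let result := args.foldl (fun result arg =>
    result ++ PySem.Str.replace arg " " "& " ++ ", ") ""
  PySem.Str.slice result none (some (-2))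

def make_arg_2nd_val_enum (args : List String) (front : String) : String :=
  let result := args.foldl (fun result arg =>
    let arg_list := (PySem.Str.split? arg " ").getD []
    let arg := if ((PySem.List.pyGet? arg_list 0).getD "") = "std::string" then
        front ++ ((PySem.List.pyGet? arg_list 1).getD "") ++ ".c_str()"
      else
        front ++ ((PySem.List.pyGet? arg_list 1).getD "")
    result ++ arg ++ ", ") ""
  PySem.Str.slice result none (some (-2))

def make_cpp_unserialize (class_name : String) (send_args : List String) : String :=
  let _ := make_print_string send_args   -- A computes and discards this
  let read_str := send_args.foldl (fun read_str arg =>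
    let _type := get_index_list arg 0 " "
    let name := get_index_list arg 1 " "
    if _type = "std::string" ∨ _type = "char*" then
      let name_len := name ++ "_length"
      if _type = "std::string" then
        read_str ++ (name ++ ".resize(" ++ name_len ++ ");\n\t") ++
          ("MEMORY_MANAGER::ReadFromBuffer(buffer, buffer_size, buffer_idx, &" ++ name ++ "[0], " ++ name_len ++ ");\n\t")
      else if _type = "char*" then
        read_str ++ ("MEMORY_MANAGER::ReadFromBuffer(buffer, buffer_size, buffer_idx, " ++ name ++ ", " ++ name_len ++ ");\n\t")
      else read_str
    else
      if _type = "uint8_t" ∨ _type = "int8_t" then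
        read_str ++ ("MEMORY_MANAGER::ReadFromBuffer(buffer, buffer_size, buffer_idx, &" ++ name ++ ");\n\t")
      else
        read_str ++ ("MEMORY_MANAGER::ReadFromBuffer(buffer, buffer_size, buffer_idx, &" ++ name ++ ");\n\t") ++
          (name ++ " = BYTE_ORDER::network_to_host(" ++ name ++ ");\n\t")) ""
  -- the '''…'''.format(…) template, as literal segments with the arguments in place
  "\nsize_t " ++ class_name ++ "::Deserialize(char* buffer, size_t buffer_size, " ++
    make_arg_ref_string send_args ++ ")\n{\n    size_t buffer_idx = 0;\n\n    " ++
    read_str ++ "\n\n    ST_LOGGER.Info(\"[" ++ class_name ++ "][InputData] " ++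
    make_print_string send_args ++ "\", " ++ make_arg_2nd_val_enum send_args "" ++
    ");\n    return buffer_idx;\n}\n    "

-- ===== PORT B =====
-- the four pieces Source B appends per arg (named here for the proofs; the computation is Source B's)
def pvRefPiece (arg : String) : String := PySem.Str.replace arg " " "& "

def pvFmtPiece (arg : String) : String :=
  let parts := (PySem.Str.split? arg " ").getD []
  ((PySem.List.pyGet? parts 1).getD "") ++ "[" ++
    (print_dictionary.get? ((PySem.List.pyGet? parts 0).getD "")).getD "" ++ "]"

def pvValPiece (arg : String) : String :=
  let parts := (PySem.Str.split? arg " ").getD []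
  let t := (PySem.List.pyGet? parts 0).getD ""
  let name := (PySem.List.pyGet? parts 1).getD ""
  if t = "std::string" then name ++ ".c_str()" else name

def pvBodyPieces (arg : String) : List String :=
  let parts := (PySem.Str.split? arg " ").getD []
  let t := (PySem.List.pyGet? parts 0).getD ""
  let name := (PySem.List.pyGet? parts 1).getD ""
  if t = "std::string" then
    [name ++ ".resize(" ++ name ++ "_length);\n\t",
     "MEMORY_MANAGER::ReadFromBuffer(buffer, buffer_size, buffer_idx, &" ++ name ++ "[0], " ++ name ++ "_length);\n\t"]
  else if t = "char*" then
    ["MEMORY_MANAGER::ReadFromBuffer(buffer, buffer_size, buffer_idx, " ++ name ++ ", " ++ name ++ "_length);\n\t"]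
  else
    ["MEMORY_MANAGER::ReadFromBuffer(buffer, buffer_size, buffer_idx, &" ++ name ++ ");\n\t"] ++
      (if ¬(t = "uint8_t" ∨ t = "int8_t") then [name ++ " = BYTE_ORDER::network_to_host(" ++ name ++ ");\n\t"] else [])

def make_cpp_unserialize_alt (class_name : String) (send_args : List String) : String :=
  let acc := send_args.foldl
    (fun (acc : List String × List String × List String × List String) arg =>
      (acc.1 ++ [pvRefPiece arg], acc.2.1 ++ [pvFmtPiece arg],
       acc.2.2.1 ++ [pvValPiece arg], acc.2.2.2 ++ pvBodyPieces arg))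
    ([], [], [], [])
  "\nsize_t " ++ class_name ++ "::Deserialize(char* buffer, size_t buffer_size, " ++
    PySem.Str.join ", " acc.1 ++ ")\n{\n    size_t buffer_idx = 0;\n\n    " ++
    PySem.Str.join "" acc.2.2.2 ++ "\n\n    ST_LOGGER.Info(\"[" ++ class_name ++ "][InputData] " ++
    PySem.Str.join ", " acc.2.1 ++ "\", " ++ PySem.Str.join ", " acc.2.2.1 ++
    ");\n    return buffer_idx;\n}\n    "

-- ===== PRECONDITION & SPEC =====
-- Pre_ excludes exactly the inputs where the Python A raises: an arg whose split-on-space list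
-- has fewer than two items (IndexError) or whose first item is not a key of print_dictionary (KeyError).
def Pre_make_cpp_unserialize (class_name : String) (send_args : List String) : Prop :=
  ∀ arg ∈ send_args,
    2 ≤ ((PySem.Str.split? arg " ").getD []).length ∧
    print_dictionary.contains ((PySem.List.pyGet? ((PySem.Str.split? arg " ").getD []) 0).getD "") = true
instance (class_name : String) (send_args : List String) : Decidable (Pre_make_cpp_unserialize class_name send_args) := by unfold Pre_make_cpp_unserialize; infer_instance

def pvWitness_make_cpp_unserialize : String × List String := ("Foo", ["int32_t a", "std::string s"])

def Spec_make_cpp_unserialize (class_name : String) (send_args : List String) (out : String) : Prop := out = make_cpp_unserialize_alt class_name send_args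
instance (class_name : String) (send_args : List String) (out : String) : Decidable (Spec_make_cpp_unserialize class_name send_args out) := by unfold Spec_make_cpp_unserialize; infer_instance

-- ===== CLAIM (what is proved, stated in full; the proofs are below) =====
def Claim_equal_make_cpp_unserialize : Prop := ∀ (class_name : String) (send_args : List String), Dom_make_cpp_unserialize class_name send_args → Pre_make_cpp_unserialize class_name send_args → Spec_make_cpp_unserialize class_name send_args (make_cpp_unserialize class_name send_args)

-- ===== LEMMAS AND PROOFS =====

-- B's fold with four independent accumulators is the four mapped lists
theorem pvFoldB (send_args : List String)
    (r f v b : List String) :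
    send_args.foldl
      (fun (acc : List String × List String × List String × List String) arg =>
        (acc.1 ++ [pvRefPiece arg], acc.2.1 ++ [pvFmtPiece arg],
         acc.2.2.1 ++ [pvValPiece arg], acc.2.2.2 ++ pvBodyPieces arg))
      (r, f, v, b)
    = (r ++ send_args.map pvRefPiece, f ++ send_args.map pvFmtPiece,
       v ++ send_args.map pvValPiece, b ++ send_args.flatMap pvBodyPieces) := by
  induction send_args generalizing r f v b with
  | nil => simp
  | cons a t ih => simp [ih]

-- a foldl that appends (g a ++ ", ") per element, at the character level
theorem pvFoldStr (g : String → String) (xs : List String) (init : String) :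
    (xs.foldl (fun r a => r ++ g a ++ ", ") init).toList
    = init.toList ++ (xs.map (fun a => (g a).toList ++ [',', ' '])).flatten := by
  induction xs generalizing init with
  | nil => simp
  | cons a t ih => simp [ih, String.toList_append]

theorem pvIntercalateConsCons (sep y z : List Char) (t' : List (List Char)) :
    List.intercalate sep (y :: z :: t') = y ++ sep ++ List.intercalate sep (z :: t') := by
  show (List.intersperse sep (y :: z :: t')).flatten = _
  rw [show List.intersperse sep (y :: z :: t') = y :: sep :: List.intersperse sep (z :: t') from rfl]
  simp [List.intercalate]

theorem pvIntercalateNil (yss : List (List Char)) :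
    List.intercalate ([] : List Char) yss = yss.flatten := by
  induction yss with
  | nil => simp [List.intercalate]
  | cons y t ih =>
    cases t with
    | nil => simp [List.intercalate]
    | cons z t' => rw [pvIntercalateConsCons, ih]; simp

theorem pvFlattenTwo (yss : List (List Char)) (h : yss ≠ []) :
    2 ≤ ((yss.map (fun ys => ys ++ [',', ' '])).flatten).length := by
  cases yss with
  | nil => exact absurd rfl h
  | cons y t => simp [List.length_append]; omega

theorem pvTakeFlatten (yss : List (List Char)) :
    List.take ((yss.map (fun ys => ys ++ [',', ' '])).flatten.length - 2)
      ((yss.map (fun ys => ys ++ [',', ' '])).flatten)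
    = List.intercalate [',', ' '] yss := by
  induction yss with
  | nil => simp [List.intercalate]
  | cons y t ih =>
    cases t with
    | nil => simp [List.intercalate]
    | cons z t' =>
      rw [List.map_cons, List.flatten_cons, List.take_append]
      rw [pvIntercalateConsCons, ← ih]
      have h1 : ((y ++ [',', ' ']) ++ (((z :: t').map (fun ys => ys ++ [',', ' '])).flatten)).length - 2
            - (y ++ [',', ' ']).length
          = (((z :: t').map (fun ys => ys ++ [',', ' '])).flatten).length - 2 := by
        simp only [List.length_append, List.length_cons, List.length_nil]
        omega
      have h2 : List.take
            (((y ++ [',', ' ']) ++ (((z :: t').map (fun ys => ys ++ [',', ' '])).flatten)).length - 2)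
            (y ++ [',', ' ']) = y ++ [',', ' '] := by
        apply List.take_of_length_le
        have hr := pvFlattenTwo (z :: t') (by simp)
        simp only [List.length_append, List.length_cons, List.length_nil] at hr ⊢
        omega
      rw [h1, h2]

-- slice[:-2] of the comma fold is the ', '.join of the pieces
theorem pvTrimJoin (g : String → String) (xs : List String) :
    PySem.Str.slice (xs.foldl (fun r a => r ++ g a ++ ", ") "") none (some (-2))
    = PySem.Str.join ", " (xs.map g) := by
  apply String.toList_inj.mp
  rw [PySem.Str.toList_slice, PySem.Str.toList_join]
  rw [PySem.Chars.slice_eq_listSlice, PySem.List.slice_to_neg_ofNat _ 2 (by omega)]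
  rw [pvFoldStr]
  simp only [List.map_map]
  have : (xs.map (fun a => (g a).toList ++ [',', ' '])) =
      ((xs.map (fun a => (g a).toList)).map (fun ys => ys ++ [',', ' '])) := by
    simp [List.map_map]
  rw [show ("" : String).toList = [] from rfl, List.nil_append, this, pvTakeFlatten]
  simp [PySem.Chars.join, Function.comp_def]


theorem pvFoldStrPlain (g : String → String) (xs : List String) (init : String) :
    (xs.foldl (fun r a => r ++ g a) init).toList
    = init.toList ++ (xs.map (fun a => (g a).toList)).flatten := by
  induction xs generalizing init with
  | nil => simp
  | cons a t ih => simp [ih, String.toList_append]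

theorem pvRefEq (s : List String) :
    make_arg_ref_string s = PySem.Str.join ", " (s.map pvRefPiece) :=
  pvTrimJoin pvRefPiece s

theorem pvFmtEq (s : List String) :
    make_print_string s = PySem.Str.join ", " (s.map pvFmtPiece) := by
  unfold make_print_string
  have hfun : (fun (result : String) arg =>
      let arg_list := (PySem.Str.split? arg " ").getD []
      result ++ ((PySem.List.pyGet? arg_list 1).getD "") ++ "[" ++
        print_replacement ((PySem.List.pyGet? arg_list 0).getD "") ++ "], ")
      = (fun (r : String) a => r ++ pvFmtPiece a ++ ", ") := by
    funext r a
    apply String.toList_inj.mp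
    simp [pvFmtPiece, print_replacement, String.toList_append]
  rw [hfun]
  exact pvTrimJoin pvFmtPiece s

theorem pvValEq (s : List String) :
    make_arg_2nd_val_enum s "" = PySem.Str.join ", " (s.map pvValPiece) := by
  unfold make_arg_2nd_val_enum
  have hfun : (fun (result : String) arg =>
      let arg_list := (PySem.Str.split? arg " ").getD []
      let arg := if ((PySem.List.pyGet? arg_list 0).getD "") = "std::string" then
          "" ++ ((PySem.List.pyGet? arg_list 1).getD "") ++ ".c_str()"
        else
          "" ++ ((PySem.List.pyGet? arg_list 1).getD "")
      result ++ arg ++ ", ")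
      = (fun (r : String) a => r ++ pvValPiece a ++ ", ") := by
    funext r a
    apply String.toList_inj.mp
    simp only [pvValPiece]
    split_ifs <;> simp [String.toList_append]
  rw [hfun]
  exact pvTrimJoin pvValPiece s

theorem pvFlattenFlatMap (s : List String) :
    (List.map (fun a => (PySem.Str.join "" (pvBodyPieces a)).toList) s).flatten
    = (List.map String.toList (s.flatMap pvBodyPieces)).flatten := by
  induction s with
  | nil => simp
  | cons a t ih =>
    simp [PySem.Str.toList_join, PySem.Chars.join, pvIntercalateNil,
      show ("" : String).toList = [] from rfl] at ih ⊢
    rw [ih]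

theorem pvBodyEq (s : List String) :
    (s.foldl (fun read_str arg =>
      let _type := get_index_list arg 0 " "
      let name := get_index_list arg 1 " "
      if _type = "std::string" ∨ _type = "char*" then
        let name_len := name ++ "_length"
        if _type = "std::string" then
          read_str ++ (name ++ ".resize(" ++ name_len ++ ");\n\t") ++
            ("MEMORY_MANAGER::ReadFromBuffer(buffer, buffer_size, buffer_idx, &" ++ name ++ "[0], " ++ name_len ++ ");\n\t")
        else if _type = "char*" then
          read_str ++ ("MEMORY_MANAGER::ReadFromBuffer(buffer, buffer_size, buffer_idx, " ++ name ++ ", " ++ name_len ++ ");\n\t")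
        else read_str
      else
        if _type = "uint8_t" ∨ _type = "int8_t" then
          read_str ++ ("MEMORY_MANAGER::ReadFromBuffer(buffer, buffer_size, buffer_idx, &" ++ name ++ ");\n\t")
        else
          read_str ++ ("MEMORY_MANAGER::ReadFromBuffer(buffer, buffer_size, buffer_idx, &" ++ name ++ ");\n\t") ++
            (name ++ " = BYTE_ORDER::network_to_host(" ++ name ++ ");\n\t")) "")
    = PySem.Str.join "" (s.flatMap pvBodyPieces) := by
  have hfun : ∀ (r : String) (a : String),
      (fun read_str arg =>
        let _type := get_index_list arg 0 " "
        let name := get_index_list arg 1 " "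
        if _type = "std::string" ∨ _type = "char*" then
          let name_len := name ++ "_length"
          if _type = "std::string" then
            read_str ++ (name ++ ".resize(" ++ name_len ++ ");\n\t") ++
              ("MEMORY_MANAGER::ReadFromBuffer(buffer, buffer_size, buffer_idx, &" ++ name ++ "[0], " ++ name_len ++ ");\n\t")
          else if _type = "char*" then
            read_str ++ ("MEMORY_MANAGER::ReadFromBuffer(buffer, buffer_size, buffer_idx, " ++ name ++ ", " ++ name_len ++ ");\n\t")
          else read_str
        else
          if _type = "uint8_t" ∨ _type = "int8_t" then
            read_str ++ ("MEMORY_MANAGER::ReadFromBuffer(buffer, buffer_size, buffer_idx, &" ++ name ++ ");\n\t")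
          else
            read_str ++ ("MEMORY_MANAGER::ReadFromBuffer(buffer, buffer_size, buffer_idx, &" ++ name ++ ");\n\t") ++
              (name ++ " = BYTE_ORDER::network_to_host(" ++ name ++ ");\n\t")) r a
      = r ++ PySem.Str.join "" (pvBodyPieces a) := by
    intro r a
    apply String.toList_inj.mp
    simp only [pvBodyPieces, get_index_list]
    split_ifs <;>
      simp_all [PySem.Str.toList_join, PySem.Chars.join, List.intercalate,
        String.toList_append]
  apply String.toList_inj.mp
  rw [funext (fun r => funext (fun a => hfun r a))]
  rw [pvFoldStrPlain (fun a => PySem.Str.join "" (pvBodyPieces a)) s "",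
    show ("" : String).toList = [] from rfl, List.nil_append, pvFlattenFlatMap,
    PySem.Str.toList_join]
  simp [PySem.Chars.join, pvIntercalateNil, show ("" : String).toList = [] from rfl]

-- ===== VERDICT (by name: the statement is the Claim_ definition above) =====
theorem make_cpp_unserialize_spec : Claim_equal_make_cpp_unserialize := by
  intro class_name send_args _ _
  unfold Spec_make_cpp_unserialize make_cpp_unserialize make_cpp_unserialize_alt
  rw [pvFoldB]
  simp only [List.nil_append]
  rw [pvRefEq, pvFmtEq, pvValEq, pvBodyEq]
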